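-- pv_equiv track=rewrite | github.com/matthewskahn/aoc_2023 | day-11/step-2.py | expand_spacetime
-- ===== SOURCE A (Python) =====
-- def expand_spacetime(arr):
--     i = 0;
--     while True:
--         if i < len(arr):
--             if all([x in ['*','.'] for x in arr[i]]):
--                 arr.insert(i, ['*'] * len(arr[i]))
--                 i += 2
--             else:
--                 i += 1
--         else:
--             break
--
--     return arr
-- ===== SOURCE B (Python) =====
-- def expand_spacetime(arr):
--     result = []
--     for row in arr:
--         if all(x in ('*', '.') for x in row):
--             result.append(['*'] * len(row))
--         result.append(row)
--     arr[:] = result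
--     return arr
-- ===== Notes on version B (the rewrite author's own statement) =====
-- stated objective: simpler
-- what changed: Replaces A's in-place index loop with insert and the i+=2 skip by a single forward pass that builds a fresh list (marker row prepended before each all-empty row) and assigns it back with arr[:] =, preserving in-place mutation.
import Mathlib
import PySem

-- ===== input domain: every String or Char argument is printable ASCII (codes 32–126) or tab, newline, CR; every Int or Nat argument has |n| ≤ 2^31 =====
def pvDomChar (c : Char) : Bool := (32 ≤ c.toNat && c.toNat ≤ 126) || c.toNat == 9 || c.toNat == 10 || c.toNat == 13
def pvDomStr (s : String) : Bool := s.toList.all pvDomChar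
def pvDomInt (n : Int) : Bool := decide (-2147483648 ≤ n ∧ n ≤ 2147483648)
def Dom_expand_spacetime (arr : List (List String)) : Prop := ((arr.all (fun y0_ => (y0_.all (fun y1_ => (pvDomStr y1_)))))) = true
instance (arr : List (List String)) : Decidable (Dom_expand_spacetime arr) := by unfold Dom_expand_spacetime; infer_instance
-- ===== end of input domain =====

-- B replaces A's in-place index loop (insert + the i+=2 skip) by one forward pass building a new list.
-- Note on side effects: A mutates its argument in place; B performs the same mutation via arr[:] = result.
-- The theorems here are about the returned value.

-- ===== PORT A =====
-- A's while loop: i is a Python int that stays ≥ 0, ported as Nat.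
def expand_spacetime_loop (arr : List (List String)) (i : Nat) : List (List String) :=
  if h : i < arr.length then
    if (arr[i]).all (fun x => ["*", "."].contains x) then
      expand_spacetime_loop
        (PySem.List.insert arr (i : Int) (List.replicate (arr[i]).length "*")) (i + 2)
    else
      expand_spacetime_loop arr (i + 1)
  else
    arr
termination_by arr.length - i
decreasing_by
  · simp [PySem.List.length_insert]; omega
  · omega

def expand_spacetime (arr : List (List String)) : List (List String) :=
  expand_spacetime_loop arr 0

-- ===== PORT B =====
def expand_spacetime_alt (arr : List (List String)) : List (List String) :=
  arr.foldl
    (fun result row =>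
      if row.all (fun x => ["*", "."].contains x) then
        (result ++ [List.replicate row.length "*"]) ++ [row]
      else
        result ++ [row])
    []

-- ===== PRECONDITION & SPEC =====
def Spec_expand_spacetime (arr : List (List String)) (out : List (List String)) : Prop := out = expand_spacetime_alt arr
instance (arr : List (List String)) (out : List (List String)) : Decidable (Spec_expand_spacetime arr out) := by unfold Spec_expand_spacetime; infer_instance

-- ===== CLAIM (what is proved, stated in full; the proofs are below) =====
def Claim_equal_expand_spacetime : Prop := ∀ (arr : List (List String)), Dom_expand_spacetime arr → Spec_expand_spacetime arr (expand_spacetime arr)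

-- ===== LEMMAS AND PROOFS =====

-- reference recursion used only inside the proofs
def pvGo (rest : List (List String)) : List (List String) :=
  match rest with
  | [] => []
  | r :: rs =>
    if r.all (fun x => ["*", "."].contains x) then
      List.replicate r.length "*" :: r :: pvGo rs
    else
      r :: pvGo rs

lemma pvLoop_eq (rest : List (List String)) :
    ∀ done : List (List String),
      expand_spacetime_loop (done ++ rest) done.length = done ++ pvGo rest := by
  induction rest with
  | nil =>
    intro done
    rw [expand_spacetime_loop]
    simp [pvGo]
  | cons r rs ih =>
    intro done
    rw [expand_spacetime_loop]
    have hlt : done.length < (done ++ r :: rs).length := by simp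
    have hget : (done ++ r :: rs)[done.length]'hlt = r := by
      rw [List.getElem_append_right (by omega)]
      simp
    rw [dif_pos hlt, hget]
    by_cases hr : r.all (fun x => ["*", "."].contains x)
    · rw [if_pos hr]
      have hins : PySem.List.insert (done ++ r :: rs) (done.length : Int)
          (List.replicate r.length "*")
          = (done ++ [List.replicate r.length "*", r]) ++ rs := by
        rw [PySem.List.insert_natCast _ _ _ (by simp)]
        simp
      have hlen : done.length + 2 = (done ++ [List.replicate r.length "*", r]).length := by
        simp
      rw [hins, hlen, ih]
      simp only [pvGo]
      rw [if_pos hr]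
      simp
    · rw [if_neg hr]
      have hlen : done.length + 1 = (done ++ [r]).length := by simp
      have hre : done ++ r :: rs = (done ++ [r]) ++ rs := by simp
      rw [hre, hlen, ih]
      simp only [pvGo]
      rw [if_neg hr]
      simp

lemma pvAlt_eq (rest : List (List String)) :
    ∀ acc : List (List String),
      rest.foldl
        (fun result row =>
          if row.all (fun x => ["*", "."].contains x) then
            (result ++ [List.replicate row.length "*"]) ++ [row]
          else
            result ++ [row]) acc = acc ++ pvGo rest := by
  induction rest with
  | nil => intro acc; simp [pvGo]
  | cons r rs ih =>
    intro acc
    rw [List.foldl_cons]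
    simp only [pvGo]
    by_cases hr : r.all (fun x => ["*", "."].contains x)
    · rw [if_pos hr, if_pos hr, ih]
      simp
    · rw [if_neg hr, if_neg hr, ih]
      simp

-- ===== VERDICT (by name: the statement is the Claim_ definition above) =====
theorem expand_spacetime_spec : Claim_equal_expand_spacetime := by
  intro arr _
  unfold Spec_expand_spacetime expand_spacetime expand_spacetime_alt
  have h := pvLoop_eq arr []
  simp only [List.nil_append, List.length_nil] at h
  rw [h, pvAlt_eq]
  simp
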